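-- pv_equiv track=rewrite | github.com/hemmer/adventofcode | 2018/day02.py | part1
-- ===== SOURCE A (Python) =====
-- from collections import Counter
--
-- def part1(string_list):
--     num_two, num_three = 0, 0
--     for string in string_list:
--         c = Counter(string)
--
--         counts = [val for _, val in c.most_common(None)]
--
--         if 2 in counts:
--             num_two += 1
--         if 3 in counts:
--             num_three += 1
--
--     return num_two * num_three
-- ===== SOURCE B (Python) =====
-- def part1(string_list):
--     num_two, num_three = 0, 0
--     for s in string_list:
--         t = sorted(s)
--         runs = []
--         i = 0
--         while i < len(t):
--             j = i
--             while j < len(t) and t[j] == t[i]: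
--                 j += 1
--             runs.append(j - i)
--             i = j
--         num_two += 2 in runs
--         num_three += 3 in runs
--     return num_two * num_three
-- ===== Notes on version B (the rewrite author's own statement) =====
-- stated objective: alternative
-- what changed: Replaces per-string hash counting (Counter + most_common, which sorts the frequency table) by sorting each string's characters and run-length scanning them with a two-index while loop; no frequency table is built.
import Mathlib
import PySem

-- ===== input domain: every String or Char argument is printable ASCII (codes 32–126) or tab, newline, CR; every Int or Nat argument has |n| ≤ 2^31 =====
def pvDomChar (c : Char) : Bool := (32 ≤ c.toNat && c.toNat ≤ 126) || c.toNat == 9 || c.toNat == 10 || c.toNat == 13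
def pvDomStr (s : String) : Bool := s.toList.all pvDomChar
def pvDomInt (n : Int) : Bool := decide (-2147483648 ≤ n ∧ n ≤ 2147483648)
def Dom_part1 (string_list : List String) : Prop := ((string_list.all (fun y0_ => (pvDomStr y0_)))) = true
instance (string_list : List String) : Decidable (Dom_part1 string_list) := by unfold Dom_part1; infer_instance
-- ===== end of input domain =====

-- B replaces per-string hash counting (Counter) by sorting each string and run-length scanning the sorted characters; objective: alternative.


-- ===== PORT A =====
-- c = Counter(string); counts = [val for _, val in c.most_common(None)]
-- most_common(None) sorts the items by count descending (stable w.r.t. insertion order)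
def part1_counts (string : String) : List Int :=
  (PySem.List.sorted (PySem.Dict.counter string.toList).items (fun it => it.2) true).map (fun it => it.2)

def part1 (string_list : List String) : Int :=
  let p := string_list.foldl (fun (acc : Int × Int) string =>
    let counts := part1_counts string
    let acc := if (2 : Int) ∈ counts then (acc.1 + 1, acc.2) else acc
    if (3 : Int) ∈ counts then (acc.1, acc.2 + 1) else acc) (0, 0)
  p.1 * p.2

-- ===== PORT B =====
-- the inner while loop 'j = i; while j < len(t) and t[j] == t[i]: j += 1' counts the run of
-- characters equal to the one at position i; we port the two-index scan as structural recursion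
-- on the suffix starting at i, where the run length is 1 + length of the takeWhile prefix of the tail
def runsOf (l : List Char) : List Int :=
  match l with
  | [] => []
  | c :: t => ((t.takeWhile (· == c)).length + 1 : Int) :: runsOf (t.dropWhile (· == c))
termination_by l.length
decreasing_by
  simp only [List.length_cons]
  exact Nat.lt_succ_of_le (List.length_dropWhile_le _ _)

def part1_alt (string_list : List String) : Int :=
  let p := string_list.foldl (fun (acc : Int × Int) s =>
    let runs := runsOf (PySem.List.sorted s.toList (fun x => x) false)
    (acc.1 + (if (2 : Int) ∈ runs then 1 else 0),
     acc.2 + (if (3 : Int) ∈ runs then 1 else 0))) (0, 0)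
  p.1 * p.2

-- ===== PRECONDITION & SPEC =====
def Spec_part1 (string_list : List String) (out : Int) : Prop := out = part1_alt string_list
instance (string_list : List String) (out : Int) : Decidable (Spec_part1 string_list out) := by unfold Spec_part1; infer_instance

-- ===== CLAIM (what is proved, stated in full; the proofs are below) =====
def Claim_equal_part1 : Prop := ∀ (string_list : List String), Dom_part1 string_list → Spec_part1 string_list (part1 string_list)

-- ===== LEMMAS AND PROOFS =====

-- membership in A's sorted value list is exactly "some character occurs k times"
theorem mem_part1_counts (s : String) (k : Int) :
    k ∈ part1_counts s ↔ ∃ c ∈ s.toList, (s.toList.count c : Int) = k := by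
  unfold part1_counts
  rw [(PySem.List.sorted_perm (PySem.Dict.counter s.toList).items (fun it => it.2) true).map
        (fun it : Char × Int => it.2) |>.mem_iff]
  rw [PySem.Dict.items_counter]
  simp only [List.map_map, List.mem_map, Function.comp]
  constructor
  · rintro ⟨c, hc, rfl⟩
    exact ⟨c, (PySem.Set.mem_ofList _ _).mp hc, rfl⟩
  · rintro ⟨c, hc, hk⟩
    exact ⟨c, (PySem.Set.mem_ofList _ _).mpr hc, hk⟩

-- on a sorted list the run lengths are exactly the multiplicities of its elements
theorem mem_runsOf_of_sorted (l : List Char) (h : l.Pairwise (· ≤ ·)) (k : Int) :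
    k ∈ runsOf l ↔ ∃ c ∈ l, (l.count c : Int) = k := by
  induction l using runsOf.induct with
  | case1 => simp [runsOf]
  | case2 c t ih =>
    have hle : ∀ x ∈ t, c ≤ x := (List.pairwise_cons.mp h).1
    have ht : t.Pairwise (· ≤ ·) := (List.pairwise_cons.mp h).2
    have hdw : (t.dropWhile (· == c)).Pairwise (· ≤ ·) :=
      List.Pairwise.sublist (List.dropWhile_sublist _) ht
    have htw : ∀ x ∈ t.takeWhile (· == c), x = c := by
      intro x hx
      have hb := List.mem_takeWhile_imp hx
      exact eq_of_beq hb
    have hmemdw : ∀ x ∈ t.dropWhile (· == c), x ∈ t := by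
      intro x hx
      exact (List.dropWhile_sublist (l := t) (· == c)).mem hx
    have hcnd : c ∉ t.dropWhile (· == c) := by
      intro hc
      cases hdwe : t.dropWhile (· == c) with
      | nil => rw [hdwe] at hc; exact absurd hc (List.not_mem_nil)
      | cons d r =>
        have hh := List.head?_dropWhile_not (· == c) t
        rw [hdwe] at hh
        simp only [List.head?_cons] at hh
        have hdc : d ≠ c := by simpa using hh
        have hcd : c ≤ d := hle d (hmemdw d (by rw [hdwe]; simp))
        have hlt : c < d := lt_of_le_of_ne hcd (fun e => hdc e.symm)
        rw [hdwe] at hc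
        rcases List.mem_cons.mp hc with rfl | hcr
        · exact absurd rfl hdc
        · have : d ≤ c := (List.pairwise_cons.mp (hdwe ▸ hdw)).1 c hcr
          exact absurd (lt_of_lt_of_le hlt this) (lt_irrefl c)
    have hsplit : t = t.takeWhile (· == c) ++ t.dropWhile (· == c) :=
      (List.takeWhile_append_dropWhile).symm
    have hcount_c : (c :: t).count c = (t.takeWhile (· == c)).length + 1 := by
      rw [List.count_cons_self]
      congr 1
      conv_lhs => rw [hsplit]
      rw [List.count_append]
      have h1 : (t.takeWhile (· == c)).count c = (t.takeWhile (· == c)).length :=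
        List.count_eq_length.mpr (fun b hb => (htw b hb).symm)
      have h2 : (t.dropWhile (· == c)).count c = 0 := List.count_eq_zero.mpr hcnd
      omega
    have hcount_other : ∀ c' ∈ t.dropWhile (· == c),
        (c :: t).count c' = (t.dropWhile (· == c)).count c' := by
      intro c' hc'
      have hne : c ≠ c' := fun e => hcnd (e ▸ hc')
      rw [List.count_cons]
      conv_lhs => rw [hsplit]
      rw [List.count_append]
      have h1 : (t.takeWhile (· == c)).count c' = 0 :=
        List.count_eq_zero.mpr (fun hx => hne (htw c' hx).symm)
      simp only [beq_iff_eq, if_neg hne]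
      omega
    rw [runsOf, List.mem_cons, ih hdw]
    constructor
    · rintro (rfl | ⟨c', hc', hk⟩)
      · exact ⟨c, List.mem_cons_self, by rw [hcount_c]; push_cast; ring⟩
      · exact ⟨c', List.mem_cons_of_mem _ (hmemdw c' hc'),
          by rw [hcount_other c' hc']; exact hk⟩
    · rintro ⟨c', hc', hk⟩
      rcases List.mem_cons.mp hc' with rfl | hct
      · left; rw [hcount_c] at hk; push_cast at hk ⊢; omega
      · rw [hsplit] at hct
        rcases List.mem_append.mp hct with htw' | hdw'
        · left
          rw [htw c' htw'] at hk
          rw [hcount_c] at hk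
          push_cast at hk ⊢; omega
        · right
          exact ⟨c', hdw', by rw [← hcount_other c' hdw']; exact hk⟩

-- A's membership test and B's membership test agree for every k
theorem counts_runs (s : String) (k : Int) :
    k ∈ part1_counts s ↔ k ∈ runsOf (PySem.List.sorted s.toList (fun x => x) false) := by
  rw [mem_part1_counts]
  have hperm := PySem.List.sorted_perm s.toList (fun x => x) false
  rw [mem_runsOf_of_sorted _ (PySem.List.sorted_pairwise s.toList (fun x => x))]
  constructor
  · rintro ⟨c, hc, hk⟩
    exact ⟨c, hperm.mem_iff.mpr hc, by rw [hperm.count_eq]; exact hk⟩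
  · rintro ⟨c, hc, hk⟩
    exact ⟨c, hperm.mem_iff.mp hc, by rw [← hperm.count_eq]; exact hk⟩

theorem part1_step_eq :
    (fun (acc : Int × Int) string =>
      let counts := part1_counts string
      let acc := if (2 : Int) ∈ counts then (acc.1 + 1, acc.2) else acc
      if (3 : Int) ∈ counts then (acc.1, acc.2 + 1) else acc)
    = (fun (acc : Int × Int) s =>
        let runs := runsOf (PySem.List.sorted s.toList (fun x => x) false)
        (acc.1 + (if (2 : Int) ∈ runs then 1 else 0),
         acc.2 + (if (3 : Int) ∈ runs then 1 else 0))) := by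
  funext acc s
  simp only [counts_runs]
  by_cases h2 : (2 : Int) ∈ runsOf (PySem.List.sorted s.toList (fun x => x) false) <;>
    by_cases h3 : (3 : Int) ∈ runsOf (PySem.List.sorted s.toList (fun x => x) false) <;>
    simp [h2, h3]

-- ===== VERDICT (by name: the statement is the Claim_ definition above) =====
theorem part1_spec : Claim_equal_part1 := by
  intro l _
  unfold Spec_part1 part1 part1_alt
  rw [part1_step_eq]
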